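-- pv_equiv track=rewrite | github.com/didymo/OnkoDICOM | src/View/util/SaveROIHelper.py | generate_non_duplicated_name
-- ===== SOURCE A (Python) =====
-- def generate_non_duplicated_name(original_name, names):
--     changed_name = original_name
--     suffix_arr = "ABCDEFGHIJKLMNOPQRSTUVWXYZ"
--     suffix_index = 0
--     suffix = ""
--     while changed_name in names:
--         suffix = suffix + suffix_arr[suffix_index]
--         changed_name = original_name + "_" + suffix
--         suffix_index = (suffix_index + 1) % len(suffix_arr)
--         if suffix_index > 0:
--             suffix = suffix[:-1]
--     return changed_name
-- ===== SOURCE B (Python) =====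
-- def generate_non_duplicated_name(original_name, names):
--     if original_name not in names:
--         return original_name
--     n = 0
--     while True:
--         candidate = (original_name + "_" + "Z" * (n // 26)
--                      + "ABCDEFGHIJKLMNOPQRSTUVWXYZ"[n % 26])
--         if candidate not in names:
--             return candidate
--         n += 1
-- ===== Notes on version B (the rewrite author's own statement) =====
-- stated objective: alternative
-- what changed: Replaces A's stateful suffix builder (append a letter, wrap the index, trim the suffix) with a closed-form candidate name indexed by an attempt counter n: 'Z'*(n//26) + LETTERS[n%26], checked in a plain search loop.
import Mathlib
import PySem

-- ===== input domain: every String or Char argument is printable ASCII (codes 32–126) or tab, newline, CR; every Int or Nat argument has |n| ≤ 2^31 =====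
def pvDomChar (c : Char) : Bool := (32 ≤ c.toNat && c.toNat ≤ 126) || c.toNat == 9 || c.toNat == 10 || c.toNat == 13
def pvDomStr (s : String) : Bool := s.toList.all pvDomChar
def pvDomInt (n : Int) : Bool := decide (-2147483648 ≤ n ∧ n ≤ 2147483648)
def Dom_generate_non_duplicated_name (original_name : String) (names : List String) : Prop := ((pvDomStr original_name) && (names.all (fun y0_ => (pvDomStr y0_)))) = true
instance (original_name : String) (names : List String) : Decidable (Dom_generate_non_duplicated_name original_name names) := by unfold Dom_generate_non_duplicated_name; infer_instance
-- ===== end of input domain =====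

-- B replaces A's stateful suffix mutation (append / trim / wrapping index) by a closed-form
-- candidate indexed by an attempt counter; same return value, similar cost (objective: alternative).

-- ===== PORT A =====
def pvArrA : List Char := "ABCDEFGHIJKLMNOPQRSTUVWXYZ".toList

-- while-loop of A as fuel recursion over its exact state (changed_name, suffix, suffix_index);
-- fuel names.length + 1 always suffices: the checked strings are pairwise distinct, so at most
-- names.length loop iterations can find their candidate in names.
def pvLoopA (names : List String) (orig : String) : Nat → String → List Char → Nat → String
  | 0, changed, _, _ => changed
  | f+1, changed, suffix, idx =>
    if changed ∈ names then
      -- suffix_index is always in [0, 26), so suffix_arr[suffix_index] never raises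
      let suffix1 := suffix ++ [PySem.List.pyGetD pvArrA (idx : Int) 'A']
      let changed1 := orig ++ "_" ++ String.ofList suffix1
      let idx1 := (idx + 1) % 26
      let suffix2 := if idx1 > 0 then PySem.List.slice suffix1 none (some (-1)) else suffix1
      pvLoopA names orig f changed1 suffix2 idx1
    else changed

def generate_non_duplicated_name (original_name : String) (names : List String) : String :=
  pvLoopA names original_name (names.length + 1) original_name [] 0

-- ===== PORT B =====
-- candidate for attempt counter n: original_name + "_" + "Z"*(n//26) + LETTERS[n%26]
def pvCandB (orig : String) (n : Nat) : String :=
  orig ++ "_" ++ String.ofList (List.replicate (n / 26) 'Z' ++ [PySem.List.pyGetD pvArrA ((n % 26 : Nat) : Int) 'A'])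

-- while True of B as fuel recursion on the counter; fuel names.length suffices (candidates are
-- pairwise distinct and distinct from original_name, which occupies one slot of names)
def pvLoopB (names : List String) (orig : String) : Nat → Nat → String
  | 0, n => pvCandB orig n
  | f+1, n => if pvCandB orig n ∈ names then pvLoopB names orig f (n+1) else pvCandB orig n

def generate_non_duplicated_name_alt (original_name : String) (names : List String) : String :=
  if original_name ∈ names then pvLoopB names original_name names.length 0 else original_name

-- ===== PRECONDITION & SPEC =====
def Spec_generate_non_duplicated_name (original_name : String) (names : List String) (out : String) : Prop := out = generate_non_duplicated_name_alt original_name names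
instance (original_name : String) (names : List String) (out : String) : Decidable (Spec_generate_non_duplicated_name original_name names out) := by unfold Spec_generate_non_duplicated_name; infer_instance

-- ===== CLAIM (what is proved, stated in full; the proofs are below) =====
def Claim_equal_generate_non_duplicated_name : Prop := ∀ (original_name : String) (names : List String), Dom_generate_non_duplicated_name original_name names → Spec_generate_non_duplicated_name original_name names (generate_non_duplicated_name original_name names)

-- ===== LEMMAS AND PROOFS =====

-- ===== VERDICT (by name: the statement is the Claim_ definition above) =====
-- A's loop state after visiting counter n is exactly (pvCandB orig n, "Z"*((n+1)/26), (n+1)%26)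
theorem pvLoop_eq (names : List String) (orig : String) :
    ∀ (f n : Nat),
      pvLoopA names orig f (pvCandB orig n) (List.replicate ((n+1)/26) 'Z') ((n+1)%26)
        = pvLoopB names orig f n := by
  intro f
  induction f with
  | zero => intro n; rfl
  | succ f ih =>
    intro n
    by_cases h : pvCandB orig n ∈ names
    · have hidx : ((n+1) % 26 + 1) % 26 = (n+2) % 26 := by omega
      have hsuffix :
          (if ((n+1) % 26 + 1) % 26 > 0 then
              PySem.List.slice
                (List.replicate ((n+1)/26) 'Z' ++ [PySem.List.pyGetD pvArrA (((n+1) % 26 : Nat) : Int) 'A'])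
                none (some (-1))
            else
              List.replicate ((n+1)/26) 'Z' ++ [PySem.List.pyGetD pvArrA (((n+1) % 26 : Nat) : Int) 'A'])
            = List.replicate ((n+2)/26) 'Z' := by
        by_cases h2 : (n+2) % 26 > 0
        · have : ((n+1) % 26 + 1) % 26 > 0 := by omega
          rw [if_pos this, PySem.List.slice_to_neg_one, List.dropLast_concat]
          have : (n+2)/26 = (n+1)/26 := by omega
          rw [this]
        · have h25 : (n+1) % 26 = 25 := by omega
          have hz : PySem.List.pyGetD pvArrA (((n+1) % 26 : Nat) : Int) 'A' = 'Z' := by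
            rw [h25]; decide
          have : ¬ ((n+1) % 26 + 1) % 26 > 0 := by omega
          rw [if_neg this, hz, ← List.replicate_succ']
          have : (n+2)/26 = (n+1)/26 + 1 := by omega
          rw [this]
      show (if pvCandB orig n ∈ names then _ else _) = _
      rw [if_pos h]
      show pvLoopA names orig f
          (orig ++ "_" ++ String.ofList (List.replicate ((n+1)/26) 'Z' ++ [PySem.List.pyGetD pvArrA (((n+1) % 26 : Nat) : Int) 'A'])) _ _ = _
      rw [hsuffix, hidx]
      have hcand : orig ++ "_" ++ String.ofList (List.replicate ((n+1)/26) 'Z' ++ [PySem.List.pyGetD pvArrA (((n+1) % 26 : Nat) : Int) 'A'])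
          = pvCandB orig (n+1) := rfl
      rw [hcand, ih (n+1)]
      show _ = (if pvCandB orig n ∈ names then pvLoopB names orig f (n+1) else pvCandB orig n)
      rw [if_pos h]
    · show (if pvCandB orig n ∈ names then _ else _) = (if pvCandB orig n ∈ names then _ else _)
      rw [if_neg h, if_neg h]

-- ===== VERDICT (by name: the statement is the Claim_ definition above) =====
theorem generate_non_duplicated_name_spec : Claim_equal_generate_non_duplicated_name := by
  intro orig names _
  unfold Spec_generate_non_duplicated_name generate_non_duplicated_name generate_non_duplicated_name_alt
  show (if orig ∈ names then _ else orig) = _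
  by_cases h : orig ∈ names
  · rw [if_pos h, if_pos h]
    have h0 : orig ++ "_" ++ String.ofList ([] ++ [PySem.List.pyGetD pvArrA ((0 : Nat) : Int) 'A'])
        = pvCandB orig 0 := rfl
    show pvLoopA names orig names.length
        (orig ++ "_" ++ String.ofList ([] ++ [PySem.List.pyGetD pvArrA ((0 : Nat) : Int) 'A']))
        (if (0 + 1) % 26 > 0 then
            PySem.List.slice ([] ++ [PySem.List.pyGetD pvArrA ((0 : Nat) : Int) 'A']) none (some (-1))
          else [] ++ [PySem.List.pyGetD pvArrA ((0 : Nat) : Int) 'A'])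
        ((0 + 1) % 26) = pvLoopB names orig names.length 0
    rw [h0]
    have hs : (if (0 + 1) % 26 > 0 then
            PySem.List.slice ([] ++ [PySem.List.pyGetD pvArrA ((0 : Nat) : Int) 'A']) none (some (-1))
          else [] ++ [PySem.List.pyGetD pvArrA ((0 : Nat) : Int) 'A'])
        = List.replicate ((0+1)/26) 'Z' := by decide
    rw [hs]
    exact pvLoop_eq names orig names.length 0
  · rw [if_neg h, if_neg h]
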